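-- pv_equiv track=rewrite | github.com/Vizuara-AI-Lab/Visual-ML | server/app/mentor/services/dataset_analyzer.py | _suggest_target_column
-- ===== SOURCE A (Python) =====
-- from typing import Dict, List, Any, Optional, Tuple
--
-- def _suggest_target_column(
--     columns: List[str], dtypes: Dict[str, str], preview_data: Optional[List[Dict]] = None
-- ) -> Optional[str]:
--     """Suggest a likely target column based on patterns."""
--     # Common target column name patterns
--     target_patterns = ["target", "label", "class", "y", "output", "result", "price", "value"]
--
--     # Check for exact or partial matches
--     for pattern in target_patterns:
--         for col in columns:
--             if pattern in col.lower():
--                 return col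
--
--     # Default to last column (common convention)
--     if columns:
--         return columns[-1]
--
--     return None
-- ===== SOURCE B (Python) =====
-- def _suggest_target_column(columns, dtypes, preview_data=None):
--     """Suggest a likely target column: single pass over columns tracking the
--     best (pattern-priority, column-order) candidate."""
--     target_patterns = ["target", "label", "class", "y", "output", "result", "price", "value"]
--     n = len(target_patterns)
--     best = None  # (index of first matching pattern, column)
--     for col in columns:
--         cl = col.lower()
--         s = n
--         for i, p in enumerate(target_patterns):
--             if p in cl:
--                 s = i
--                 break
--         if best is None:
--             if s < n:
--                 best = (s, col)
--         else:
--             if s < n and s < best[0]: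
--                 best = (s, col)
--     if best is not None:
--         return best[1]
--     return columns[-1] if columns else None
-- ===== Notes on version B (the rewrite author's own statement) =====
-- stated objective: alternative
-- what changed: Replaces A's pattern-outer/column-inner nested loops with a single column-major pass that computes each column's first-matching-pattern index and keeps the best (pattern-index, column-order) candidate with strict improvement, falling back to the last column.
import Mathlib
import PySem

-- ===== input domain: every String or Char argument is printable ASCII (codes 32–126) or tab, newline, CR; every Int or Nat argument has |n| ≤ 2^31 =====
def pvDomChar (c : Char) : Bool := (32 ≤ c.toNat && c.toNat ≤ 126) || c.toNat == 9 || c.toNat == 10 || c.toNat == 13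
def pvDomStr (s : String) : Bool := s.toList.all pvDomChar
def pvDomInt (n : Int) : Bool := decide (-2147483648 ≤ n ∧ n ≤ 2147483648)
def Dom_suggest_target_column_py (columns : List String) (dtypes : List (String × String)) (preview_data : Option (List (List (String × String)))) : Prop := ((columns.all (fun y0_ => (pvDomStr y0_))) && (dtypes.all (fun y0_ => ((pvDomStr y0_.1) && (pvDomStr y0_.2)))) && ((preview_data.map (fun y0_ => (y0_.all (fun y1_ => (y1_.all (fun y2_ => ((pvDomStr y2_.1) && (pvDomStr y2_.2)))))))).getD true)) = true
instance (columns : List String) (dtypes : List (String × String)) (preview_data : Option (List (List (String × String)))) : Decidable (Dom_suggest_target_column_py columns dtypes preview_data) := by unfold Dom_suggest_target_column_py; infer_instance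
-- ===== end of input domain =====

-- B replaces A's pattern-outer/column-inner double loop with a single column-major pass
-- tracking the best (first-matching-pattern index, column) candidate (objective: alternative).


-- ===== PORT A =====
-- "pattern in col.lower()"
def pvHas (p c : String) : Bool := PySem.Str.isIn p (PySem.Str.lower c)

def pvTargetPatterns : List String :=
  ["target", "label", "class", "y", "output", "result", "price", "value"]

-- inner loop: "for col in columns: if pattern in col.lower(): return col"
def pvAInner (p : String) : List String → Option String
  | [] => none
  | c :: cs => if pvHas p c then some c else pvAInner p cs

-- outer loop over patterns
def pvALoop : List String → List String → Option String
  | [], _ => none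
  | p :: ps, cs =>
    match pvAInner p cs with
    | some c => some c
    | none => pvALoop ps cs

def suggest_target_column_py (columns : List String) (dtypes : List (String × String)) (preview_data : Option (List (List (String × String)))) : Option String :=
  match pvALoop pvTargetPatterns columns with
  | some c => some c
  | none => if columns.isEmpty then none else PySem.List.pyGet? columns (-1)

-- ===== PORT B =====
-- inner loop of B: index of the first pattern contained in cl (len(patterns) if none)
def pvScore (cl : String) : List String → Nat
  | [] => 0
  | p :: ps => if PySem.Str.isIn p cl then 0 else pvScore cl ps + 1

-- one step of B's single pass: "if s < n and (best is None or s < best[0]): best = (s, col)"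
def pvBStep (ps : List String) (best : Option (Nat × String)) (c : String) : Option (Nat × String) :=
  let s := pvScore (PySem.Str.lower c) ps
  match best with
  | none => if s < ps.length then some (s, c) else best
  | some (k, _) => if s < ps.length ∧ s < k then some (s, c) else best

def pvBFold (ps : List String) (cs : List String) : Option (Nat × String) :=
  cs.foldl (pvBStep ps) none

def suggest_target_column_py_alt (columns : List String) (dtypes : List (String × String)) (preview_data : Option (List (List (String × String)))) : Option String :=
  match pvBFold pvTargetPatterns columns with
  | some (_, c) => some c
  | none => if columns.isEmpty then none else PySem.List.pyGet? columns (-1)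

-- ===== PRECONDITION & SPEC =====
def Spec_suggest_target_column_py (columns : List String) (dtypes : List (String × String)) (preview_data : Option (List (List (String × String)))) (out : Option String) : Prop := out = suggest_target_column_py_alt columns dtypes preview_data
instance (columns : List String) (dtypes : List (String × String)) (preview_data : Option (List (List (String × String)))) (out : Option String) : Decidable (Spec_suggest_target_column_py columns dtypes preview_data out) := by unfold Spec_suggest_target_column_py; infer_instance

-- ===== CLAIM (what is proved, stated in full; the proofs are below) =====
def Claim_equal_suggest_target_column_py : Prop := ∀ (columns : List String) (dtypes : List (String × String)) (preview_data : Option (List (List (String × String)))), Dom_suggest_target_column_py columns dtypes preview_data → Spec_suggest_target_column_py columns dtypes preview_data (suggest_target_column_py columns dtypes preview_data)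

-- ===== LEMMAS AND PROOFS =====

-- score of a column under a pattern list
def pvS (ps : List String) (c : String) : Nat := pvScore (PySem.Str.lower c) ps

-- minimum score over a list of columns, capped at ps.length
def pvM (ps : List String) (cs : List String) : Nat :=
  cs.foldr (fun c m => min (pvS ps c) m) ps.length

-- the common characterisation: first column achieving the minimal score (none if no match)
def pvG (ps : List String) : List String → Option (Nat × String)
  | [] => none
  | c :: cs =>
    if pvS ps c ≤ pvM ps cs ∧ pvS ps c < ps.length then some (pvS ps c, c) else pvG ps cs

theorem pvS_pos (p : String) (ps : List String) (c : String) (h : pvHas p c = false) :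
    pvS (p :: ps) c = pvS ps c + 1 := by
  simp [pvS, pvScore, pvHas] at *
  simp [h]

theorem pvS_zero (p : String) (ps : List String) (c : String) (h : pvHas p c = true) :
    pvS (p :: ps) c = 0 := by
  simp [pvS, pvScore, pvHas] at *
  simp [h]

theorem pvM_le_of_mem (ps : List String) (cs : List String) (x : String) (hx : x ∈ cs) :
    pvM ps cs ≤ pvS ps x := by
  induction cs with
  | nil => simp at hx
  | cons c cs ih =>
    rcases List.mem_cons.mp hx with h | h
    · subst h; simp [pvM]
    · have := ih h; simp [pvM] at *; omega

theorem pvM_shift (p : String) (ps : List String) (cs : List String)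
    (h : ∀ x ∈ cs, pvHas p x = false) : pvM (p :: ps) cs = pvM ps cs + 1 := by
  induction cs with
  | nil => simp [pvM]
  | cons c cs ih =>
    have hc := h c (List.mem_cons_self)
    have ih' := ih (fun x hx => h x (List.mem_cons_of_mem _ hx))
    simp [pvM] at *
    rw [pvS_pos p ps c hc, ih']
    omega

theorem pvAInner_none (p : String) (cs : List String) (h : pvAInner p cs = none) :
    ∀ x ∈ cs, pvHas p x = false := by
  induction cs with
  | nil => simp
  | cons c cs ih =>
    cases hc : pvHas p c with
    | true => simp [pvAInner, hc] at h
    | false =>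
      simp [pvAInner, hc] at h
      intro x hx
      rcases List.mem_cons.mp hx with he | he
      · subst he; exact hc
      · exact ih h x he

theorem pvAInner_some_G (p : String) (ps : List String) (cs : List String) (x : String)
    (h : pvAInner p cs = some x) : pvG (p :: ps) cs = some (0, x) := by
  induction cs with
  | nil => simp [pvAInner] at h
  | cons c cs ih =>
    cases hc : pvHas p c with
    | true =>
      simp [pvAInner, hc] at h
      subst h
      have h0 := pvS_zero p ps c hc
      have hcond : pvS (p :: ps) c ≤ pvM (p :: ps) cs ∧ pvS (p :: ps) c < (p :: ps).length := by
        rw [h0]; exact ⟨Nat.zero_le _, by simp⟩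
      simp only [pvG]
      rw [if_pos hcond, h0]
    | false =>
      simp [pvAInner, hc] at h
      -- x is in cs and matches p, so pvM (p::ps) cs = 0 while pvS (p::ps) c ≥ 1
      have hmem : x ∈ cs ∧ pvHas p x = true := by
        clear ih
        induction cs with
        | nil => simp [pvAInner] at h
        | cons d ds ihd =>
          cases hd : pvHas p d with
          | true =>
            simp [pvAInner, hd] at h
            subst h; exact ⟨List.mem_cons_self, hd⟩
          | false =>
            simp [pvAInner, hd] at h
            have := ihd h
            exact ⟨List.mem_cons_of_mem _ this.1, this.2⟩
      have hM : pvM (p :: ps) cs = 0 := by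
        have h1 := pvM_le_of_mem (p :: ps) cs x hmem.1
        rw [pvS_zero p ps x hmem.2] at h1
        omega
      have hcpos := pvS_pos p ps c hc
      have hneg : ¬ (pvS (p :: ps) c ≤ pvM (p :: ps) cs ∧ pvS (p :: ps) c < (p :: ps).length) := by
        rw [hM, hcpos]; omega
      simp only [pvG]
      rw [if_neg hneg]
      exact ih h

theorem pvG_nil (cs : List String) : pvG [] cs = none := by
  induction cs with
  | nil => rfl
  | cons c cs ih => simp [pvG, ih]

theorem pvG_shift (p : String) (ps : List String) (cs : List String)
    (h : ∀ x ∈ cs, pvHas p x = false) :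
    pvG (p :: ps) cs = (pvG ps cs).map (fun q => (q.1 + 1, q.2)) := by
  induction cs with
  | nil => simp [pvG]
  | cons c cs ih =>
    have hc := h c (List.mem_cons_self)
    have htail : ∀ x ∈ cs, pvHas p x = false := fun x hx => h x (List.mem_cons_of_mem _ hx)
    have ih' := ih htail
    have hsc := pvS_pos p ps c hc
    have hmc := pvM_shift p ps cs htail
    by_cases hcond : pvS ps c ≤ pvM ps cs ∧ pvS ps c < ps.length
    · have hcond' : pvS (p :: ps) c ≤ pvM (p :: ps) cs ∧ pvS (p :: ps) c < (p :: ps).length := by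
        rw [hsc, hmc]; simp; omega
      simp only [pvG]
      rw [if_pos hcond', if_pos hcond]
      simp [hsc]
    · have hcond' : ¬ (pvS (p :: ps) c ≤ pvM (p :: ps) cs ∧ pvS (p :: ps) c < (p :: ps).length) := by
        rw [hsc, hmc]; simp only [List.length_cons]; omega
      simp only [pvG]
      rw [if_neg hcond', if_neg hcond]
      exact ih'

theorem pvALoop_eq_G (ps : List String) (cs : List String) :
    pvALoop ps cs = (pvG ps cs).map Prod.snd := by
  induction ps with
  | nil => simp [pvALoop, pvG_nil]
  | cons p ps ih =>
    cases hin : pvAInner p cs with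
    | some x =>
      rw [pvAInner_some_G p ps cs x hin]
      simp [pvALoop, hin]
    | none =>
      have hall := pvAInner_none p cs hin
      rw [pvG_shift p ps cs hall]
      simp [pvALoop, hin, ih]
      cases pvG ps cs <;> simp

theorem pvBFold_inv (ps : List String) (cs : List String) (k : Nat) (x : String)
    (hk : k < ps.length) :
    List.foldl (pvBStep ps) (some (k, x)) cs =
      if k ≤ pvM ps cs then some (k, x) else pvG ps cs := by
  induction cs generalizing k x with
  | nil =>
    simp only [List.foldl_nil, pvM, List.foldr_nil]
    rw [if_pos (Nat.le_of_lt hk)]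
  | cons c cs ih =>
    simp only [List.foldl_cons]
    have hmle : pvM ps (c :: cs) ≤ pvS ps c := by
      simp only [pvM, List.foldr_cons]
      exact Nat.min_le_left _ _
    have hmin : pvM ps (c :: cs) = min (pvS ps c) (pvM ps cs) := by
      simp [pvM]
    by_cases hc : pvS ps c < ps.length ∧ pvS ps c < k
    · have hstep : pvBStep ps (some (k, x)) c = some (pvS ps c, c) := by
        have hc' : pvScore (PySem.Str.lower c) ps < ps.length ∧ pvScore (PySem.Str.lower c) ps < k := hc
        simp only [pvBStep]
        rw [if_pos hc']
        rfl
      rw [hstep, ih _ _ hc.1]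
      have hkm : ¬ k ≤ pvM ps (c :: cs) := by omega
      rw [if_neg hkm]
      simp only [pvG]
      by_cases h2 : pvS ps c ≤ pvM ps cs
      · rw [if_pos h2, if_pos ⟨h2, hc.1⟩]
      · rw [if_neg h2, if_neg (fun hh => h2 hh.1)]
    · have hstep : pvBStep ps (some (k, x)) c = some (k, x) := by
        have hc' : ¬ (pvScore (PySem.Str.lower c) ps < ps.length ∧ pvScore (PySem.Str.lower c) ps < k) := hc
        simp only [pvBStep]
        rw [if_neg hc']
      rw [hstep, ih _ _ hk]
      have hks : k ≤ pvS ps c := by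
        rcases not_and_or.mp hc with h | h <;> omega
      by_cases hkm : k ≤ pvM ps cs
      · rw [if_pos hkm, if_pos (by omega)]
      · rw [if_neg hkm, if_neg (by omega)]
        simp only [pvG]
        have hcond : ¬ (pvS ps c ≤ pvM ps cs ∧ pvS ps c < ps.length) := by
          intro hh; exact hkm (le_trans hks hh.1)
        rw [if_neg hcond]

theorem pvBFold_eq_G (ps : List String) (cs : List String) : pvBFold ps cs = pvG ps cs := by
  induction cs with
  | nil => rfl
  | cons c cs ih =>
    simp only [pvBFold, List.foldl_cons] at *
    by_cases hc : pvS ps c < ps.length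
    · have hstep : pvBStep ps none c = some (pvS ps c, c) := by
        have hc' : pvScore (PySem.Str.lower c) ps < ps.length := hc
        simp only [pvBStep]
        rw [if_pos hc']
        rfl
      rw [hstep, pvBFold_inv ps cs _ c hc]
      simp only [pvG]
      by_cases h2 : pvS ps c ≤ pvM ps cs
      · rw [if_pos h2, if_pos ⟨h2, hc⟩]
      · rw [if_neg h2, if_neg (fun hh => h2 hh.1)]
    · have hstep : pvBStep ps none c = none := by
        have hc' : ¬ pvScore (PySem.Str.lower c) ps < ps.length := hc
        simp only [pvBStep]
        rw [if_neg hc']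
      have hcond : ¬ (pvS ps c ≤ pvM ps cs ∧ pvS ps c < ps.length) := fun h => hc h.2
      rw [hstep, ih]
      simp only [pvG]
      rw [if_neg hcond]

theorem pvMain (ps cs : List String) : pvALoop ps cs = (pvBFold ps cs).map Prod.snd := by
  rw [pvALoop_eq_G, pvBFold_eq_G]

-- ===== VERDICT (by name: the statement is the Claim_ definition above) =====
theorem suggest_target_column_py_spec : Claim_equal_suggest_target_column_py := by
  intro columns dtypes preview_data _dom
  unfold Spec_suggest_target_column_py suggest_target_column_py suggest_target_column_py_alt
  rw [pvMain]
  cases pvBFold pvTargetPatterns columns with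
  | none => simp
  | some q => cases q; simp
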